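-- pv_equiv track=rewrite | github.com/sunnyanna0/-coding-test | 프로그래머스/2/172927. 광물 캐기/광물 캐기.py | max_need
-- ===== SOURCE A (Python) =====
-- def group(m_list):
--     sum = 0
--     for m in m_list:
--         if m == "diamond":
--             sum += 25
--         elif m == "iron":
--             sum += 5
--         else:
--             sum += 1
--     return sum
--
-- def max_need(picks, minerals):
--     minerals_group = []
--     # 5개씩 끊어서 각 그룹의 난이도(돌 곡괭이 기준) 계산
--     for i in range(0, len(minerals), 5):
--         s = group(minerals[i:i+5])
--         minerals_group.append(s)
--
--     # 1) 난이도 기준으로 내림차순 정렬된 인덱스 리스트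
--     sorted_idx = sorted(
--         range(len(minerals_group)),
--         key=lambda i: minerals_group[i],
--         reverse=True
--     )
--
--     # 2) 각 그룹 번호에 "등수"를 기록
--     #    ranks[g] = 0 → 가장 어려운 그룹
--     ranks = [0] * len(minerals_group)
--     for rank, idx in enumerate(sorted_idx):
--         ranks[idx] = rank
--     return ranks
-- ===== SOURCE B (Python) =====
-- def group_score(ms):
--     d = ms.count("diamond")
--     i = ms.count("iron")
--     return 25 * d + 5 * i + (len(ms) - d - i)
--
-- def max_need(picks, minerals):
--     scores = [group_score(minerals[i:i+5]) for i in range(0, len(minerals), 5)]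
--     return [sum(1 for t in scores if t > s) + sum(1 for t in scores[:i] if t == s)
--             for i, s in enumerate(scores)]
-- ===== Notes on version B (the rewrite author's own statement) =====
-- stated objective: alternative
-- what changed: B computes each group's competition rank directly by counting groups with strictly greater score plus equal-score groups at earlier indices, instead of A's stable descending sort of indices followed by inverting the permutation.
import Mathlib
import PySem

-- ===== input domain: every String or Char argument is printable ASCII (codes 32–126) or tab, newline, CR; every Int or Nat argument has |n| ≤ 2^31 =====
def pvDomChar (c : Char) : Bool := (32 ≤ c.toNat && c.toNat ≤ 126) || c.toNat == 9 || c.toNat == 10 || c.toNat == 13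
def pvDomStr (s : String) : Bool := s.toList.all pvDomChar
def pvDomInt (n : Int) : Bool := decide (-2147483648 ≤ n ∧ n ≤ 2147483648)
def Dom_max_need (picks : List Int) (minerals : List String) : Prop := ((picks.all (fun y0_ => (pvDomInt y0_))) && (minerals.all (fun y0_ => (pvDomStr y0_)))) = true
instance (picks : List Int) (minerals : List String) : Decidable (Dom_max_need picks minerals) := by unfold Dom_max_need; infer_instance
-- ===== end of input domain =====

-- B replaces A's sort-indices-then-invert-the-permutation with a direct competition-rank count
-- (groups with strictly greater score, plus equal-score groups at earlier indices); objective: alternative.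

-- ===== PORT A =====
-- group: foldl over the group's minerals accumulating 25/5/1
def pvGroup (m_list : List String) : Int :=
  m_list.foldl (fun sum m =>
    if m = "diamond" then sum + 25 else if m = "iron" then sum + 5 else sum + 1) 0

def max_need (picks : List Int) (minerals : List String) : List Int :=
  -- for i in range(0, len(minerals), 5): append group(minerals[i:i+5])
  let minerals_group : List Int :=
    (PySem.List.pyRange 0 (minerals.length : Int) 5).foldl
      (fun acc i => acc ++ [pvGroup (PySem.List.slice minerals (some i) (some (i + 5)))]) []
  -- sorted(range(len), key=lambda i: minerals_group[i], reverse=True);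
  -- minerals_group[i] ported as pyGetD (i is always in range here, so exact)
  let sorted_idx : List Int :=
    PySem.List.sorted (PySem.List.pyRange 0 (minerals_group.length : Int) 1)
      (fun i => PySem.List.pyGetD minerals_group i 0) true
  -- ranks = [0]*len; for rank, idx in enumerate(sorted_idx): ranks[idx] = rank
  -- ranks[idx] = rank ported as pySetD (idx is always in range here, so exact)
  (PySem.List.enumerate sorted_idx 0).foldl
    (fun ranks p => PySem.List.pySetD ranks p.2 p.1)
    (List.replicate minerals_group.length 0)

-- ===== PORT B =====
-- group_score via .count: 25*d + 5*i + (rest are stone)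
def pvGroupScore (ms : List String) : Int :=
  let d : Int := PySem.List.count ms "diamond"
  let i : Int := PySem.List.count ms "iron"
  25 * d + 5 * i + ((ms.length : Int) - d - i)

def max_need_alt (picks : List Int) (minerals : List String) : List Int :=
  let scores : List Int :=
    (PySem.List.pyRange 0 (minerals.length : Int) 5).map
      (fun i => pvGroupScore (PySem.List.slice minerals (some i) (some (i + 5))))
  -- [sum(1 for t in scores if t > s) + sum(1 for t in scores[:i] if t == s) for i, s in enumerate(scores)]
  (PySem.List.enumerate scores 0).map (fun p =>
    ((scores.countP (fun t => p.2 < t) : Nat) : Int) +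
    (((PySem.List.slice scores none (some p.1)).countP (fun t => t = p.2) : Nat) : Int))

-- ===== PRECONDITION & SPEC =====
def Spec_max_need (picks : List Int) (minerals : List String) (out : List Int) : Prop := out = max_need_alt picks minerals
instance (picks : List Int) (minerals : List String) (out : List Int) : Decidable (Spec_max_need picks minerals out) := by unfold Spec_max_need; infer_instance

-- ===== CLAIM (what is proved, stated in full; the proofs are below) =====
def Claim_equal_max_need : Prop := ∀ (picks : List Int) (minerals : List String), Dom_max_need picks minerals → Spec_max_need picks minerals (max_need picks minerals)

-- ===== LEMMAS AND PROOFS =====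

-- the two group-scoring helpers agree
theorem pvGroup_go (ms : List String) : ∀ c : Int,
    ms.foldl (fun sum m =>
      if m = "diamond" then sum + 25 else if m = "iron" then sum + 5 else sum + 1) c
      = c + pvGroupScore ms := by
  induction ms with
  | nil => intro c; simp [pvGroupScore, PySem.List.count]
  | cons m ms ih =>
    intro c
    simp only [List.foldl_cons, ih]
    simp only [pvGroupScore, PySem.List.count, List.count_cons]
    by_cases h1 : m = "diamond"
    · simp only [h1, if_true]
      simp
      push_cast
      ring
    · by_cases h2 : m = "iron"
      · simp only [h1, h2, if_false, if_true]
        simp [h1]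
        push_cast
        ring
      · simp only [h1, h2, if_false]
        simp [h1, h2]
        push_cast
        ring

theorem pvGroup_eq (ms : List String) : pvGroup ms = pvGroupScore ms := by
  simpa using pvGroup_go ms 0

-- key and the stable-descending strict order A's sort realises on distinct indices
abbrev pvKey (s : List Int) (i : Int) : Int := PySem.List.pyGetD s i 0
abbrev pvRel (s : List Int) (a b : Int) : Prop :=
  pvKey s b < pvKey s a ∨ (pvKey s a = pvKey s b ∧ a < b)

theorem pvRel_asymm {s : List Int} {a b : Int} (h : pvRel s a b) : ¬ pvRel s b a := by
  rcases h with h | ⟨h1, h2⟩ <;> rintro (g | ⟨g1, g2⟩) <;> omega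

theorem insertBy_nil' {α : Type} (f : α → α → Bool) (x : α) :
    PySem.List.insertBy f x [] = [x] := rfl

theorem insertBy_cons' {α : Type} (f : α → α → Bool) (x y : α) (ys : List α) :
    PySem.List.insertBy f x (y :: ys) = if f x y then x :: y :: ys else y :: PySem.List.insertBy f x ys := rfl

theorem insertBy_perm {α : Type} (f : α → α → Bool) (x : α) (acc : List α) :
    (PySem.List.insertBy f x acc).Perm (x :: acc) := by
  induction acc with
  | nil => rw [insertBy_nil']
  | cons y ys ih =>
    rw [insertBy_cons']
    by_cases h : f x y
    · rw [if_pos h]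
    · rw [if_neg h]
      exact (ih.cons y).trans (List.Perm.swap x y ys)

theorem insertBy_pairwise (s : List Int) (x : Int) (acc : List Int)
    (hp : acc.Pairwise (pvRel s)) (hlt : ∀ y ∈ acc, y < x) :
    (PySem.List.insertBy (fun a b => decide (pvKey s b < pvKey s a)) x acc).Pairwise (pvRel s) := by
  induction acc with
  | nil => rw [insertBy_nil']; simp
  | cons y ys ih =>
    rw [insertBy_cons']
    rcases List.pairwise_cons.mp hp with ⟨hy, hys⟩
    by_cases hfy : pvKey s y < pvKey s x
    · rw [if_pos (by simpa using hfy)]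
      refine List.pairwise_cons.mpr ⟨?_, hp⟩
      intro z hz
      rcases List.mem_cons.mp hz with rfl | hz2
      · exact Or.inl hfy
      · rcases hy z hz2 with h | ⟨h1, h2⟩
        · exact Or.inl (lt_trans h hfy)
        · exact Or.inl (by omega)
    · rw [if_neg (by simpa using hfy)]
      refine List.pairwise_cons.mpr
        ⟨?_, ih hys (fun z hz => hlt z (List.mem_cons_of_mem y hz))⟩
      intro z hz
      have hz' := (insertBy_perm _ x ys).mem_iff.mp hz
      rcases List.mem_cons.mp hz' with rfl | hz2
      · rcases lt_or_eq_of_le (not_lt.mp hfy) with h | h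
        · exact Or.inl h
        · exact Or.inr ⟨h.symm, hlt y (List.mem_cons_self)⟩
      · exact hy z hz2

theorem sorted_foldl (s : List Int) (xs : List Int) :
    PySem.List.sorted xs (fun i => PySem.List.pyGetD s i 0) true
      = xs.foldl (fun acc x =>
          PySem.List.insertBy (fun a b => decide (PySem.List.pyGetD s b 0 < PySem.List.pyGetD s a 0)) x acc) [] := rfl

theorem sorted_pairwise_rel (s : List Int) (m : Nat) :
    (PySem.List.sorted (PySem.List.pyRange 0 (m : Int) 1)
      (fun i => PySem.List.pyGetD s i 0) true).Pairwise (pvRel s) := by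
  induction m with
  | zero =>
    rw [sorted_foldl]
    simp [PySem.List.pyRange_one_eq_nil (le_refl (0 : Int))]
  | succ m ih =>
    have hsp : PySem.List.pyRange 0 ((m + 1 : Nat) : Int) 1
        = PySem.List.pyRange 0 (m : Int) 1 ++ [(m : Int)] := by
      push_cast
      exact PySem.List.pyRange_one_succ_right (by positivity)
    rw [sorted_foldl, hsp, List.foldl_append, List.foldl_cons, List.foldl_nil, ← sorted_foldl]
    refine insertBy_pairwise s (m : Int) _ ih ?_
    intro y hy
    have := (PySem.List.sorted_perm (PySem.List.pyRange 0 (m : Int) 1)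
      (fun i => PySem.List.pyGetD s i 0) true).mem_iff.mp hy
    exact (PySem.List.mem_pyRange_one.mp this).2

-- position of an element in a pvRel-pairwise list = number of elements ordered before it
theorem idxOf_eq_countP (s : List Int) (L : List Int) (x : Int)
    (hp : L.Pairwise (pvRel s)) (hx : x ∈ L) :
    L.idxOf x = L.countP (fun y => decide (pvRel s y x)) := by
  induction L with
  | nil => cases hx
  | cons h t ih =>
    rcases List.pairwise_cons.mp hp with ⟨hh, ht⟩
    by_cases hxh : h = x
    · subst hxh
      rw [List.idxOf_cons_self, List.countP_cons]
      have h1 : (decide (pvRel s h h)) = false := by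
        simp only [decide_eq_false_iff_not]
        rintro (g | ⟨g1, g2⟩) <;> omega
      have h2 : t.countP (fun y => decide (pvRel s y h)) = 0 := by
        rw [List.countP_eq_zero]
        intro z hz
        simp only [decide_eq_true_eq]
        exact pvRel_asymm (hh z hz)
      simp only [h2, h1]
      simp
    · have hxt : x ∈ t := by
        rcases List.mem_cons.mp hx with rfl | h'
        · exact absurd rfl hxh
        · exact h'
      rw [List.countP_cons]
      have h1 : (decide (pvRel s h x)) = true := decide_eq_true (hh x hxt)
      have h2 : (h :: t).idxOf x = t.idxOf x + 1 := List.idxOf_cons_ne t hxh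
      rw [h2, ih ht hxt]
      simp only [h1]
      simp

-- the fill-ranks foldl writes t + k at position L[k]
theorem fill_ranks (L : List Int) (t : Int) (r0 : List Int)
    (hb : ∀ x ∈ L, 0 ≤ x ∧ x.toNat < r0.length) (hnd : L.Nodup) :
    ((PySem.List.enumerate L t).foldl (fun r p => PySem.List.pySetD r p.2 p.1) r0).length = r0.length ∧
    ∀ i : Nat, i < r0.length →
      ((PySem.List.enumerate L t).foldl (fun r p => PySem.List.pySetD r p.2 p.1) r0).getD i 0 =
        if (i : Int) ∈ L then t + (L.idxOf (i : Int) : Int) else r0.getD i 0 := by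
  induction L generalizing t r0 with
  | nil => simp [PySem.List.enumerate]
  | cons x L ih =>
    rcases List.nodup_cons.mp hnd with ⟨hxL, hndL⟩
    have hx0 := (hb x List.mem_cons_self).1
    have hxlen := (hb x List.mem_cons_self).2
    rw [PySem.List.enumerate_cons, List.foldl_cons]
    have hset : PySem.List.pySetD r0 x t = r0.set x.toNat t :=
      PySem.List.pySetD_of_nonneg _ _ hx0
    rw [hset]
    have hlen : (r0.set x.toNat t).length = r0.length := by simp
    obtain ⟨ihlen, ihval⟩ := ih (t + 1) (r0.set x.toNat t)
      (fun z hz => by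
        have := hb z (List.mem_cons_of_mem _ hz)
        omega)
      hndL
    constructor
    · rw [ihlen, hlen]
    · intro i hi
      rw [ihval i (by omega)]
      by_cases hmem : (i : Int) ∈ x :: L
      · rcases List.mem_cons.mp hmem with hix | hiL
        · have hieq : x.toNat = i := by omega
          have hnotL : ((i : Int)) ∉ L := by rw [hix]; exact hxL
          rw [if_neg hnotL, if_pos hmem]
          have : (x :: L).idxOf ((i : Int)) = 0 := by
            rw [hix, List.idxOf_cons_self]
          rw [this]
          have hgd : (r0.set x.toNat t).getD i 0 = t := by
            subst hieq
            rw [List.getD_eq_getElem _ _ (by omega)]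
            exact List.getElem_set_self (by omega)
          rw [hgd]
          simp
        · have hne : ((i : Int)) ≠ x := by
            intro h
            exact hxL (h ▸ hiL)
          rw [if_pos hiL, if_pos hmem]
          have : (x :: L).idxOf ((i : Int)) = L.idxOf ((i : Int)) + 1 :=
            List.idxOf_cons_ne L (fun h => hne h.symm)
          rw [this]
          push_cast
          ring
      · have hne : ((i : Int)) ≠ x := fun h => hmem (h ▸ List.mem_cons_self)
        have hniL : ((i : Int)) ∉ L := fun h => hmem (List.mem_cons_of_mem _ h)
        rw [if_neg hniL, if_neg hmem]
        have hnei : x.toNat ≠ i := by omega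
        rw [List.getD_eq_getElem _ _ (by omega), List.getElem_set_ne hnei,
          ← List.getD_eq_getElem _ _ (by omega)]

theorem countP_or_disjoint {α : Type} (p q : α → Bool) (l : List α)
    (h : ∀ a ∈ l, ¬(p a = true ∧ q a = true)) :
    l.countP (fun a => p a || q a) = l.countP p + l.countP q := by
  induction l with
  | nil => simp
  | cons a l ih =>
    rw [List.countP_cons, List.countP_cons, List.countP_cons,
      ih (fun b hb => h b (List.mem_cons_of_mem _ hb))]
    have := h a List.mem_cons_self
    by_cases hp : p a <;> by_cases hq : q a
    · exact absurd ⟨hp, hq⟩ this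
    all_goals simp [hp, hq]
    all_goals omega

-- Nat-level core: position of index k in A's stable descending sort of indices
theorem idx_count (s : List Int) (k : Nat) (hk : k < s.length) :
    (PySem.List.sorted (PySem.List.pyRange 0 (s.length : Int) 1)
        (fun i => PySem.List.pyGetD s i 0) true).idxOf ((k : Int))
      = s.countP (fun t => decide (pvKey s (k : Int) < t))
        + (s.take k).countP (fun t => decide (t = pvKey s (k : Int))) := by
  set L := PySem.List.sorted (PySem.List.pyRange 0 (s.length : Int) 1)
    (fun i => PySem.List.pyGetD s i 0) true with hLdef
  have hperm : L.Perm (PySem.List.pyRange 0 (s.length : Int) 1) :=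
    PySem.List.sorted_perm _ _ _
  have hkL : ((k : Int)) ∈ L := by
    rw [hperm.mem_iff, PySem.List.mem_pyRange_one]
    constructor <;> omega
  rw [idxOf_eq_countP s L _ (sorted_pairwise_rel s s.length) hkL,
    hperm.countP_eq]
  -- split the disjunction
  have hsplit : (PySem.List.pyRange 0 (s.length : Int) 1).countP
      (fun y => decide (pvRel s y (k : Int)))
      = (PySem.List.pyRange 0 (s.length : Int) 1).countP
          (fun y => decide (pvKey s (k : Int) < pvKey s y))
        + (PySem.List.pyRange 0 (s.length : Int) 1).countP
          (fun y => decide (pvKey s y = pvKey s (k : Int) ∧ y < (k : Int))) := by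
    rw [← countP_or_disjoint _ _ _ (by
      intro a _
      rintro ⟨h1, h2⟩
      simp only [decide_eq_true_eq] at h1 h2
      omega)]
    apply List.countP_congr
    intro y _
    simp only [Bool.or_eq_true, decide_eq_true_eq]
  rw [hsplit]
  congr 1
  · -- strictly greater count over the range = over the scores
    have hmap := PySem.List.map_pyGetD_pyRange_zero s (0 : Int)
    calc (PySem.List.pyRange 0 (s.length : Int) 1).countP
          (fun y => decide (pvKey s (k : Int) < pvKey s y))
        = ((PySem.List.pyRange 0 (PySem.List.len s) 1).map
            (fun j => PySem.List.pyGetD s j 0)).countP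
            (fun t => decide (pvKey s (k : Int) < t)) := by
          rw [List.countP_map]; rfl
      _ = s.countP (fun t => decide (pvKey s (k : Int) < t)) := by rw [hmap]
  · -- equal count restricted to earlier indices = count over take k
    have happ : PySem.List.pyRange 0 (s.length : Int) 1
        = PySem.List.pyRange 0 (k : Int) 1 ++ PySem.List.pyRange (k : Int) (s.length : Int) 1 :=
      PySem.List.pyRange_one_append _ _ _ (by omega) (by omega)
    rw [happ, List.countP_append]
    have hzero : (PySem.List.pyRange (k : Int) (s.length : Int) 1).countP
        (fun y => decide (pvKey s y = pvKey s (k : Int) ∧ y < (k : Int))) = 0 := by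
      rw [List.countP_eq_zero]
      intro y hy
      have := PySem.List.mem_pyRange_one.mp hy
      simp only [decide_eq_true_eq]
      rintro ⟨_, h2⟩
      omega
    rw [hzero, Nat.add_zero]
    have hlt : (s.take k).length = k := by
      rw [List.length_take]
      omega
    have hmap := PySem.List.map_pyGetD_pyRange_zero (s.take k) (0 : Int)
    have hlen' : PySem.List.len (s.take k) = (k : Int) := by
      show ((s.take k).length : Int) = (k : Int)
      rw [hlt]
    calc (PySem.List.pyRange 0 (k : Int) 1).countP
          (fun y => decide (pvKey s y = pvKey s (k : Int) ∧ y < (k : Int)))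
        = (PySem.List.pyRange 0 (k : Int) 1).countP
            (fun y => decide (PySem.List.pyGetD (s.take k) y 0 = pvKey s (k : Int))) := by
          apply List.countP_congr
          intro y hy
          have hyb := PySem.List.mem_pyRange_one.mp hy
          have hget : PySem.List.pyGetD (s.take k) y 0 = PySem.List.pyGetD s y 0 := by
            rw [PySem.List.pyGetD_eq_getElem _ _ hyb.1 (by omega),
              PySem.List.pyGetD_eq_getElem _ _ hyb.1 (by omega)]
            exact List.getElem_take
          simp only [hget, decide_eq_true_eq]
          constructor
          · rintro ⟨h1, _⟩; exact h1
          · intro h1; exact ⟨h1, hyb.2⟩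
      _ = ((PySem.List.pyRange 0 (PySem.List.len (s.take k)) 1).map
            (fun j => PySem.List.pyGetD (s.take k) j 0)).countP
            (fun t => decide (t = pvKey s (k : Int))) := by
          rw [List.countP_map, hlen']
          rfl
      _ = (s.take k).countP (fun t => decide (t = pvKey s (k : Int))) := by rw [hmap]

-- the core equality, stated on an arbitrary list of group scores
theorem ranks_eq (s : List Int) :
    ((PySem.List.enumerate
        (PySem.List.sorted (PySem.List.pyRange 0 (s.length : Int) 1)
          (fun i => PySem.List.pyGetD s i 0) true) 0).foldl
      (fun ranks p => PySem.List.pySetD ranks p.2 p.1) (List.replicate s.length 0)) =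
    (PySem.List.enumerate s 0).map (fun p =>
      ((s.countP (fun t => p.2 < t) : Nat) : Int) +
      (((PySem.List.slice s none (some p.1)).countP (fun t => t = p.2) : Nat) : Int)) := by
  set L := PySem.List.sorted (PySem.List.pyRange 0 (s.length : Int) 1)
    (fun i => PySem.List.pyGetD s i 0) true with hLdef
  have hperm : L.Perm (PySem.List.pyRange 0 (s.length : Int) 1) :=
    PySem.List.sorted_perm _ _ _
  have hnd : L.Nodup := hperm.nodup_iff.mpr (PySem.List.nodup_pyRange_one _ _)
  obtain ⟨hlen, hval⟩ := fill_ranks L 0 (List.replicate s.length (0 : Int))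
    (fun x hx => by
      have := PySem.List.mem_pyRange_one.mp (hperm.mem_iff.mp hx)
      constructor
      · exact this.1
      · rw [List.length_replicate]; omega)
    hnd
  rw [PySem.List.enumerate_eq_map_pyRange s (0 : Int), List.map_map]
  apply List.ext_getElem
  · rw [hlen, List.length_replicate, List.length_map, PySem.List.length_pyRange_one]
    simp [PySem.List.len]
  · intro k hk1 hk2
    have hkN : k < s.length := by
      rw [hlen, List.length_replicate] at hk1
      exact hk1
    have hkmem : ((k : Int)) ∈ L := by
      rw [hperm.mem_iff, PySem.List.mem_pyRange_one]
      constructor <;> omega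
    -- left side
    have hL : (((PySem.List.enumerate L 0).foldl
        (fun ranks p => PySem.List.pySetD ranks p.2 p.1)
        (List.replicate s.length (0 : Int))))[k]'hk1
        = (L.idxOf ((k : Int)) : Int) := by
      rw [← List.getD_eq_getElem _ (0 : Int) hk1, hval k (by rw [List.length_replicate]; exact hkN),
        if_pos hkmem]
      ring
    rw [hL, List.getElem_map]
    simp only [Function.comp_apply, PySem.List.getElem_pyRange_one, zero_add]
    have hslice : PySem.List.slice s none (some ((k : Int))) = s.take k := by
      rw [PySem.List.slice_to _ (by omega)]
      simp
    rw [hslice]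
    rw [idx_count s k hkN]
    push_cast
    ring

-- ===== VERDICT (by name: the statement is the Claim_ definition above) =====
theorem max_need_spec : Claim_equal_max_need := by
  intro picks minerals _
  unfold Spec_max_need max_need max_need_alt
  rw [PySem.List.foldl_append_singleton_eq_map]
  rw [List.nil_append]
  rw [List.map_congr_left (fun i _ => pvGroup_eq _)]
  exact ranks_eq _
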